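-- pv_equiv track=rewrite | github.com/sMiNT0S/AIBugBench | scripts/update_readme_toc.py | _render_updated_readme
-- ===== SOURCE A (Python) =====
-- TOC_START = "<!-- TOC_START -->"
--
-- TOC_END = "<!-- TOC_END -->"
--
-- def _render_updated_readme(lines: list[str], toc_body: str) -> tuple[list[str], bool]:
--     """Return updated README lines and whether content changed.
--
--     This function is side-effect free to keep main() control flow simple so
--     mypy does not mis-detect unreachable code paths.
--     """
--     new_lines: list[str] = []
--     changed = False
--     i = 0
--     while i < len(lines):
--         if lines[i].strip() == TOC_START:
--             new_lines.append(lines[i])  # keep marker line with its newline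
--             i += 1
--             old: list[str] = []
--             while i < len(lines) and lines[i].strip() != TOC_END:
--                 old.append(lines[i])
--                 i += 1
--             rendered = "\n" + toc_body
--             if "".join(old) != rendered:
--                 changed = True
--             new_lines.append(rendered)
--             if i < len(lines):
--                 new_lines.append(lines[i])  # TOC_END line
--         else:
--             new_lines.append(lines[i])
--         i += 1
--     return new_lines, changed
-- ===== SOURCE B (Python) =====
-- TOC_START = "<!-- TOC_START -->"
--
-- TOC_END = "<!-- TOC_END -->"
--
--
-- def _render_updated_readme(lines, toc_body):
--     """Parse the lines into TOC blocks, then render: a two-phase decomposition."""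
--     rendered = "\n" + toc_body
--
--     def split_blocks(rest):
--         # -> ([(pre, start_line, old_content, end_line_or_None)], trailing_lines)
--         s = next((k for k, ln in enumerate(rest) if ln.strip() == TOC_START), None)
--         if s is None:
--             return [], rest
--         after = rest[s + 1:]
--         e = next((j for j, ln in enumerate(after) if ln.strip() == TOC_END), None)
--         if e is None:
--             return [(rest[:s], rest[s], after, None)], []
--         blocks, tail = split_blocks(after[e + 1:])
--         return [(rest[:s], rest[s], after[:e], after[e])] + blocks, tail
--
--     blocks, tail = split_blocks(lines)
--     changed = any("".join(old) != rendered for _, _, old, _ in blocks)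
--     out = []
--     for pre, start, old, end in blocks:
--         out += pre + [start, rendered]
--         if end is not None:
--             out.append(end)
--     out += tail
--     return out, changed
-- ===== Notes on version B (the rewrite author's own statement) =====
-- stated objective: alternative
-- what changed: Replaces A's single line-by-line state machine (index loop with an inner marker-consuming while and in-loop flag updates) by a two-phase decomposition: first parse the lines into TOC blocks (pre, start line, old content, optional end line) plus trailing lines via find-and-slice recursion, then render the output and compute the changed flag with any() over the parsed blocks.
import Mathlib
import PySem

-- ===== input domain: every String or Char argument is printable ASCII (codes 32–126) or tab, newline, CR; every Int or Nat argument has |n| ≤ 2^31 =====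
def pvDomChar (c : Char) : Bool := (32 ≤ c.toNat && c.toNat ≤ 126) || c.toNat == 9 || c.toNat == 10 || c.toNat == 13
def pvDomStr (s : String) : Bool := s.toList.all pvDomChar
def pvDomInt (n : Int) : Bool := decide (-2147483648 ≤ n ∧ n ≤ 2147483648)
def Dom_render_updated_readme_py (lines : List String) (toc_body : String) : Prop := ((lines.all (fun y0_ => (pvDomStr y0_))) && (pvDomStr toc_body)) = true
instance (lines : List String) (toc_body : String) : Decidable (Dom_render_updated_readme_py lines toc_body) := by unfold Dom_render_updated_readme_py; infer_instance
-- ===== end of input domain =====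

-- B replaces A's single line-by-line state machine by a two-phase decomposition:
-- parse the lines into TOC blocks (find/slice), then render; same cost, clearer structure.

def pvTocStart : String := "<!-- TOC_START -->"
def pvTocEnd : String := "<!-- TOC_END -->"

-- ===== PORT A =====
-- inner while: collect lines until one strips to TOC_END (returned as head of .2)
def pvAInner : List String → List String × List String
  | [] => ([], [])
  | l :: ls =>
    if PySem.Str.strip l == pvTocEnd then ([], l :: ls)
    else
      let r := pvAInner ls
      (l :: r.1, r.2)

-- needed by pvALoop's termination proof
theorem pvAInner_len (ls : List String) : (pvAInner ls).2.length ≤ ls.length := by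
  induction ls with
  | nil => simp [pvAInner]
  | cons l ls ih =>
    simp only [pvAInner]
    split
    · simp
    · simpa using Nat.le_succ_of_le ih

-- outer while of A, consuming the remaining lines in place of the index i
def pvALoop (toc_body : String) : List String → List String × Bool
  | [] => ([], false)
  | l :: ls =>
    if PySem.Str.strip l == pvTocStart then
      let r := pvAInner ls
      let rendered := "\n" ++ toc_body
      let changed1 := PySem.Str.join "" r.1 != rendered
      match h : r.2 with
      | [] => ([l, rendered], changed1)
      | e :: rest' =>
        let t := pvALoop toc_body rest'
        (l :: rendered :: e :: t.1, changed1 || t.2)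
    else
      let t := pvALoop toc_body ls
      (l :: t.1, t.2)
termination_by ls => ls.length
decreasing_by
  · have hle := pvAInner_len ls
    rw [h] at hle
    simp at hle ⊢
    omega
  · simp

def render_updated_readme_py (lines : List String) (toc_body : String) : List String × Bool :=
  pvALoop toc_body lines

-- ===== PORT B =====
-- phase 1 of B: split into blocks (pre, start_line, old_content, end_line?) plus the trailing lines
def pvSplitBlocks : List String → List (List String × String × List String × Option String) × List String := fun rest =>
  match h1 : rest.findIdx? (fun ln => PySem.Str.strip ln == pvTocStart) with
  | none => ([], rest)
  | some s =>
    let after := rest.drop (s + 1)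
    match after.findIdx? (fun ln => PySem.Str.strip ln == pvTocEnd) with
    | none => ([(rest.take s, rest.getD s "", after, none)], [])
    | some e =>
      let p := pvSplitBlocks (after.drop (e + 1))
      ((rest.take s, rest.getD s "", after.take e, some (after.getD e "")) :: p.1, p.2)
termination_by rest => rest.length
decreasing_by
  have hs := (List.findIdx?_eq_some_iff_findIdx_eq.mp h1).1
  simp
  omega

-- phase 2 of B: render the blocks
def render_updated_readme_py_alt (lines : List String) (toc_body : String) : List String × Bool :=
  let rendered := "\n" ++ toc_body
  let p := pvSplitBlocks lines
  let changed := p.1.any (fun b => PySem.Str.join "" b.2.2.1 != rendered)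
  let out := p.1.foldl (fun acc b =>
      acc ++ (b.1 ++ [b.2.1, rendered] ++ (match b.2.2.2 with | some x => [x] | none => []))) []
  (out ++ p.2, changed)

-- ===== PRECONDITION & SPEC =====
def Spec_render_updated_readme_py (lines : List String) (toc_body : String) (out : List String × Bool) : Prop := out = render_updated_readme_py_alt lines toc_body
instance (lines : List String) (toc_body : String) (out : List String × Bool) : Decidable (Spec_render_updated_readme_py lines toc_body out) := by unfold Spec_render_updated_readme_py; infer_instance

-- ===== CLAIM (what is proved, stated in full; the proofs are below) =====
def Claim_equal_render_updated_readme_py : Prop := ∀ (lines : List String) (toc_body : String), Dom_render_updated_readme_py lines toc_body → Spec_render_updated_readme_py lines toc_body (render_updated_readme_py lines toc_body)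

-- ===== LEMMAS AND PROOFS =====

def pvRender (toc : String) (b : List String × String × List String × Option String) : List String :=
  b.1 ++ [b.2.1, "\n" ++ toc] ++ (match b.2.2.2 with | some x => [x] | none => [])

def pvChanged (toc : String) (b : List String × String × List String × Option String) : Bool :=
  PySem.Str.join "" b.2.2.1 != ("\n" ++ toc)

theorem pvAlt_eq (lines : List String) (toc : String) :
    render_updated_readme_py_alt lines toc =
      ((pvSplitBlocks lines).1.flatMap (pvRender toc) ++ (pvSplitBlocks lines).2,
       (pvSplitBlocks lines).1.any (pvChanged toc)) := by
  unfold render_updated_readme_py_alt pvRender pvChanged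
  simp only [PySem.List.foldl_append_eq_flatMap, List.nil_append]

theorem pvSplit_none {rest : List String}
    (h1 : rest.findIdx? (fun ln => PySem.Str.strip ln == pvTocStart) = none) :
    pvSplitBlocks rest = ([], rest) := by
  rw [pvSplitBlocks]
  split
  · rfl
  · rename_i s hs
    rw [h1] at hs
    cases hs

theorem pvSplit_some_none {rest : List String} {s : Nat}
    (h1 : rest.findIdx? (fun ln => PySem.Str.strip ln == pvTocStart) = some s)
    (h2 : (rest.drop (s + 1)).findIdx? (fun ln => PySem.Str.strip ln == pvTocEnd) = none) :
    pvSplitBlocks rest = ([(rest.take s, rest.getD s "", rest.drop (s + 1), none)], []) := by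
  rw [pvSplitBlocks]
  split
  · rename_i hs
    rw [h1] at hs
    cases hs
  · rename_i s' hs'
    rw [h1] at hs'
    injection hs' with hs'
    subst hs'
    simp only [h2]

theorem pvSplit_some_some {rest : List String} {s e : Nat}
    (h1 : rest.findIdx? (fun ln => PySem.Str.strip ln == pvTocStart) = some s)
    (h2 : (rest.drop (s + 1)).findIdx? (fun ln => PySem.Str.strip ln == pvTocEnd) = some e) :
    pvSplitBlocks rest =
      ((rest.take s, rest.getD s "", (rest.drop (s + 1)).take e,
        some ((rest.drop (s + 1)).getD e "")) :: (pvSplitBlocks ((rest.drop (s + 1)).drop (e + 1))).1,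
       (pvSplitBlocks ((rest.drop (s + 1)).drop (e + 1))).2) := by
  rw [pvSplitBlocks]
  split
  · rename_i hs
    rw [h1] at hs
    cases hs
  · rename_i s' hs'
    rw [h1] at hs'
    injection hs' with hs'
    subst hs'
    simp only [h2]

theorem pvFind_props {p : String → Bool} {l : List String} {i : Nat}
    (h : List.findIdx? p l = some i) :
    i < l.length ∧ p (l.getD i "") = true ∧ ∀ x ∈ l.take i, p x = false := by
  obtain ⟨hlt, hfi⟩ := List.findIdx?_eq_some_iff_findIdx_eq.mp h
  subst hfi
  refine ⟨hlt, ?_, ?_⟩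
  · rw [List.getD_eq_getElem l _ hlt]
    exact List.findIdx_getElem
  · intro x hx
    rw [List.mem_take_iff_getElem] at hx
    obtain ⟨j, hj, rfl⟩ := hx
    have hjlt : j < List.findIdx p l := by omega
    simpa using List.not_of_lt_findIdx hjlt

theorem pvALoop_prefix (toc : String) (pre rest' : List String)
    (h : ∀ l ∈ pre, (PySem.Str.strip l == pvTocStart) = false) :
    pvALoop toc (pre ++ rest') = (pre ++ (pvALoop toc rest').1, (pvALoop toc rest').2) := by
  induction pre with
  | nil => simp
  | cons l pre ih =>
    have hl : (PySem.Str.strip l == pvTocStart) = false := h l (by simp)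
    rw [List.cons_append, pvALoop]
    simp only [hl]
    rw [ih (fun x hx => h x (by simp [hx]))]
    simp

theorem pvALoop_no_start (toc : String) (rest : List String)
    (h : ∀ l ∈ rest, (PySem.Str.strip l == pvTocStart) = false) :
    pvALoop toc rest = (rest, false) := by
  have := pvALoop_prefix toc rest [] h
  simpa [pvALoop] using this

theorem pvAInner_no_end (ls : List String)
    (h : ∀ l ∈ ls, (PySem.Str.strip l == pvTocEnd) = false) :
    pvAInner ls = (ls, []) := by
  induction ls with
  | nil => rfl
  | cons l ls ih =>
    have hl := h l (by simp)
    rw [pvAInner]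
    simp only [hl]
    rw [ih (fun x hx => h x (by simp [hx]))]
    simp

theorem pvAInner_split (pre : List String) (l : String) (rest' : List String)
    (h : ∀ x ∈ pre, (PySem.Str.strip x == pvTocEnd) = false)
    (hl : (PySem.Str.strip l == pvTocEnd) = true) :
    pvAInner (pre ++ l :: rest') = (pre, l :: rest') := by
  induction pre with
  | nil => simp [pvAInner, hl]
  | cons x pre ih =>
    have hx := h x (by simp)
    rw [List.cons_append, pvAInner]
    simp only [hx]
    rw [ih (fun y hy => h y (by simp [hy]))]
    simp

theorem pvMain (toc : String) : ∀ (n : Nat) (rest : List String), rest.length ≤ n →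
    pvALoop toc rest =
      ((pvSplitBlocks rest).1.flatMap (pvRender toc) ++ (pvSplitBlocks rest).2,
       (pvSplitBlocks rest).1.any (pvChanged toc)) := by
  intro n
  induction n with
  | zero =>
    intro rest hlen
    have : rest = [] := List.length_eq_zero_iff.mp (Nat.le_zero.mp hlen)
    subst this
    rw [pvSplit_none (by simp : List.findIdx? (fun ln => PySem.Str.strip ln == pvTocStart) ([] : List String) = none)]
    simp [pvALoop]
  | succ n ih =>
    intro rest hlen
    cases h1 : rest.findIdx? (fun ln => PySem.Str.strip ln == pvTocStart) with
    | none =>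
      rw [pvSplit_none h1, pvALoop_no_start toc rest]
      · simp
      · intro l hl
        exact List.findIdx?_eq_none_iff.mp h1 l hl
    | some s =>
      obtain ⟨hs, hps, hpre⟩ := pvFind_props h1
      have hdecomp : rest = rest.take s ++ rest.getD s "" :: rest.drop (s + 1) := by
        conv_lhs => rw [← List.take_append_drop s rest]
        rw [List.drop_eq_getElem_cons hs, List.getD_eq_getElem rest _ hs]
      cases h2 : (rest.drop (s + 1)).findIdx? (fun ln => PySem.Str.strip ln == pvTocEnd) with
      | none =>
        rw [pvSplit_some_none h1 h2]
        conv_lhs => rw [hdecomp]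
        rw [pvALoop_prefix toc _ _ hpre, pvALoop]
        simp only [hps]
        rw [pvAInner_no_end (rest.drop (s + 1)) (fun l hl => List.findIdx?_eq_none_iff.mp h2 l hl)]
        simp [pvRender, pvChanged]
      | some e =>
        obtain ⟨he, hpe, hpree⟩ := pvFind_props h2
        have hedecomp : rest.drop (s + 1) = (rest.drop (s + 1)).take e ++
            (rest.drop (s + 1)).getD e "" :: (rest.drop (s + 1)).drop (e + 1) := by
          conv_lhs => rw [← List.take_append_drop e (rest.drop (s + 1))]
          rw [List.drop_eq_getElem_cons he, List.getD_eq_getElem (rest.drop (s + 1)) _ he]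
        rw [pvSplit_some_some h1 h2]
        conv_lhs => rw [hdecomp, hedecomp]
        rw [pvALoop_prefix toc _ _ hpre, pvALoop]
        simp only [hps]
        rw [pvAInner_split _ _ _ hpree hpe]
        have hrec := ih ((rest.drop (s + 1)).drop (e + 1)) (by simp; omega)
        simp only []
        rw [hrec]
        simp [pvRender, pvChanged]
  
-- ===== VERDICT (by name: the statement is the Claim_ definition above) =====
theorem render_updated_readme_py_spec : Claim_equal_render_updated_readme_py := by
  intro lines toc _
  unfold Spec_render_updated_readme_py render_updated_readme_py
  rw [pvAlt_eq, pvMain toc lines.length lines (le_refl _)]
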